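-- pv_equiv track=rewrite | github.com/hs7n22/mahjong-ai-assistant | backend/tile_utils.py | normalize_tiles_to_chinese
-- ===== SOURCE A (Python) =====
-- from typing import List, Dict
--
-- def normalize_tiles_to_chinese(tiles: List[str]) -> List[str]:
--     return [
--         t.replace("wan", "万")
--         .replace("tong", "筒")
--         .replace("tiao", "条")
--         .replace("dong", "东风")
--         .replace("nanfeng", "南风")
--         .replace("xi", "西风")
--         .replace("bei", "北风")
--         .replace("hongzhong", "红中")
--         .replace("fa", "发财")
--         .replace("bai", "白版")
--         for t in tiles
--     ]
-- ===== SOURCE B (Python) =====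
-- from typing import List
--
-- # pinyin -> Chinese, in the same priority order as the original replace chain
-- _TILE_MAP = [
--     ("wan", "万"), ("tong", "筒"), ("tiao", "条"), ("dong", "东风"),
--     ("nanfeng", "南风"), ("xi", "西风"), ("bei", "北风"),
--     ("hongzhong", "红中"), ("fa", "发财"), ("bai", "白版"),
-- ]
--
-- def normalize_tiles_to_chinese(tiles: List[str]) -> List[str]:
--     out = []
--     for t in tiles:
--         res = []
--         i = 0
--         n = len(t)
--         while i < n:
--             for k, v in _TILE_MAP:
--                 if t.startswith(k, i):
--                     res.append(v)
--                     i += len(k)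
--                     break
--             else:
--                 res.append(t[i])
--                 i += 1
--         out.append("".join(res))
--     return out
-- ===== Notes on version B (the rewrite author's own statement) =====
-- stated objective: alternative
-- what changed: Replaces A's ten sequential full-string .replace passes with a single left-to-right scan that tries the pinyin->Chinese table at each position, emitting the Chinese value on the first match.
import Mathlib
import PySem

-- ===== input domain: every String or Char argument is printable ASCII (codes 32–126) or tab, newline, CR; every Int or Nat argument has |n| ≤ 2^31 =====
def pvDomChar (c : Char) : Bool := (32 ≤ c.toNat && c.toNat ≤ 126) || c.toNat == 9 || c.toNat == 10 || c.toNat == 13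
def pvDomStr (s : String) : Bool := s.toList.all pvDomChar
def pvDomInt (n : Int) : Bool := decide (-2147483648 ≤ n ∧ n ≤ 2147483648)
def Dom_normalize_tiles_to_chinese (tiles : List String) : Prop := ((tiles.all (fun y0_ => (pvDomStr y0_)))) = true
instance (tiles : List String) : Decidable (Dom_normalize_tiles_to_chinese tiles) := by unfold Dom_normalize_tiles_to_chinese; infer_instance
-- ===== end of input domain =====

-- B replaces A's chain of ten sequential .replace passes by one left-to-right scan
-- driven by a pinyin→Chinese table (objective: alternative, a single pass instead of ten).

-- ===== PORT A =====
-- literal transliteration of A: ten chained str.replace calls inside a list comprehension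
def normalize_tiles_to_chinese (tiles : List String) : List String :=
  tiles.map (fun t =>
    (PySem.Str.replace (PySem.Str.replace (PySem.Str.replace (PySem.Str.replace
      (PySem.Str.replace (PySem.Str.replace (PySem.Str.replace (PySem.Str.replace
      (PySem.Str.replace (PySem.Str.replace t "wan" "万") "tong" "筒") "tiao" "条")
      "dong" "东风") "nanfeng" "南风") "xi" "西风") "bei" "北风")
      "hongzhong" "红中") "fa" "发财") "bai" "白版"))

-- ===== PORT B =====
-- the pinyin→Chinese table of Source B, in the same priority order
def pvPairs : List (List Char × List Char) :=
  [(['w','a','n'], ['万']), (['t','o','n','g'], ['筒']), (['t','i','a','o'], ['条']),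
   (['d','o','n','g'], ['东','风']), (['n','a','n','f','e','n','g'], ['南','风']),
   (['x','i'], ['西','风']), (['b','e','i'], ['北','风']),
   (['h','o','n','g','z','h','o','n','g'], ['红','中']), (['f','a'], ['发','财']),
   (['b','a','i'], ['白','版'])]

-- Source B's while-loop over one tile: at each position try the table keys in order;
-- on the first match emit the Chinese value and skip the key, else copy the char
def pvScan : List Char → List Char
  | [] => []
  | c :: cs =>
    match pvPairs.find? (fun p => p.1.isPrefixOf (c :: cs)) with
    | some (k, v) => v ++ pvScan (cs.drop (k.length - 1))
    | none => c :: pvScan cs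
termination_by s => s.length
decreasing_by
  · simp only [List.length_cons, List.length_drop]; omega
  · simp

def normalize_tiles_to_chinese_alt (tiles : List String) : List String :=
  tiles.map (fun t => String.ofList (pvScan t.toList))

-- ===== PRECONDITION & SPEC =====
def Spec_normalize_tiles_to_chinese (tiles : List String) (out : List String) : Prop := out = normalize_tiles_to_chinese_alt tiles
instance (tiles : List String) (out : List String) : Decidable (Spec_normalize_tiles_to_chinese tiles out) := by unfold Spec_normalize_tiles_to_chinese; infer_instance

-- ===== CLAIM (what is proved, stated in full; the proofs are below) =====
def Claim_equal_normalize_tiles_to_chinese : Prop := ∀ (tiles : List String), Dom_normalize_tiles_to_chinese tiles → Spec_normalize_tiles_to_chinese tiles (normalize_tiles_to_chinese tiles)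

-- ===== LEMMAS AND PROOFS =====

-- simple structural version of Python's str.replace (old nonempty)
def pvRepl (old new : List Char) : List Char → List Char
  | [] => []
  | c :: t =>
    if old.isPrefixOf (c :: t) then new ++ pvRepl old new (t.drop (old.length - 1))
    else c :: pvRepl old new t
termination_by s => s.length
decreasing_by
  · simp only [List.length_cons, List.length_drop]; omega
  · simp

theorem pvRepl_nil (old new : List Char) : pvRepl old new [] = [] := by
  simp [pvRepl]

theorem pvRepl_cons (old new : List Char) (c : Char) (t : List Char) :
    pvRepl old new (c :: t) =
      if old.isPrefixOf (c :: t) then new ++ pvRepl old new (t.drop (old.length - 1))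
      else c :: pvRepl old new t := by
  rw [pvRepl]

-- equation lemmas for replace.go
theorem go_zero (old new l acc : List Char) :
    PySem.Chars.replace.go old new 0 l acc = acc.reverse ++ l := by
  rw [PySem.Chars.replace.go]

theorem go_nil (old new : List Char) (n : Nat) (acc : List Char) :
    PySem.Chars.replace.go old new (n + 1) [] acc = acc.reverse := by
  rw [PySem.Chars.replace.go]
  omega

theorem go_cons (old new : List Char) (n : Nat) (c : Char) (t acc : List Char) :
    PySem.Chars.replace.go old new (n + 1) (c :: t) acc =
      if old.isPrefixOf (c :: t) then
        PySem.Chars.replace.go old new n (List.drop old.length (c :: t)) (new.reverse ++ acc)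
      else PySem.Chars.replace.go old new n t (c :: acc) := by
  rw [PySem.Chars.replace.go]

-- replace.go with enough fuel computes pvRepl
theorem go_eq_pvRepl (old new : List Char) (hold : old ≠ []) :
    ∀ (fuel : Nat) (l acc : List Char), l.length ≤ fuel →
      PySem.Chars.replace.go old new fuel l acc = acc.reverse ++ pvRepl old new l := by
  intro fuel
  induction fuel with
  | zero =>
      intro l acc h
      have hl : l = [] := by cases l <;> simp_all
      subst hl
      rw [go_zero]
      simp [pvRepl_nil]
  | succ n ih =>
      intro l acc h
      cases l with
      | nil =>
          rw [go_nil]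
          simp [pvRepl_nil]
      | cons c t =>
          rw [go_cons]
          by_cases hp : old.isPrefixOf (c :: t) = true
          · rw [if_pos hp]
            obtain ⟨o, old', rfl⟩ : ∃ o old'', old = o :: old'' := by
              cases old with
              | nil => exact absurd rfl hold
              | cons o old'' => exact ⟨o, old'', rfl⟩
            have hdrop : List.drop (o :: old').length (c :: t) = t.drop ((o :: old').length - 1) := by
              simp
            have hle : (t.drop ((o :: old').length - 1)).length ≤ n := by
              simp only [List.length_drop]
              simp only [List.length_cons] at h
              omega
            rw [hdrop, ih _ _ hle]
            rw [pvRepl_cons, if_pos hp]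
            simp
          · rw [if_neg hp]
            have hle : t.length ≤ n := by
              simp only [List.length_cons] at h
              omega
            rw [ih t (c :: acc) hle]
            rw [pvRepl_cons, if_neg hp]
            simp

theorem replace_eq_pvRepl (old new s : List Char) (hold : old ≠ []) :
    PySem.Chars.replace s old new = pvRepl old new s := by
  rw [PySem.Chars.replace]
  have : old.isEmpty = false := by cases old <;> simp_all
  rw [this]
  simpa using go_eq_pvRepl old new hold s.length s [] (le_refl _)

-- if neither of k, t is a prefix of the other, k is not a prefix of t ++ v
theorem not_prefix_append (k t v : List Char) (h1 : ¬ k <+: t) (h2 : ¬ t <+: k) :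
    ¬ k <+: (t ++ v) := by
  intro hk
  have ht : t <+: t ++ v := List.prefix_append t v
  rcases List.prefix_or_prefix_of_prefix hk ht with h | h
  · exact h1 h
  · exact h2 h

-- separation condition: replacing k leaves a leading block t ++ … untouched for every
-- nonempty suffix t of u
def pvSep (k u : List Char) : Prop :=
  ∀ t ∈ u.tails, t ≠ [] → ¬ k <+: t ∧ ¬ t <+: k

-- pvRepl distributes over a clean leading block
theorem pvRepl_append (old new : List Char) (u v : List Char) (h : pvSep old u) :
    pvRepl old new (u ++ v) = u ++ pvRepl old new v := by
  induction u with
  | nil => simp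
  | cons c u' ih =>
      have hcu : ¬ old <+: ((c :: u') ++ v) := by
        have := h (c :: u') (by simp [List.mem_tails]) (by simp)
        exact not_prefix_append _ _ _ this.1 this.2
      rw [List.cons_append, pvRepl_cons, if_neg (by simpa [List.isPrefixOf_iff_prefix] using hcu)]
      rw [ih]
      · simp
      · intro t ht hne
        exact h t (by
          rw [List.mem_tails] at ht ⊢
          exact ht.trans (List.suffix_cons_iff.mpr (Or.inr (List.suffix_refl _)))) hne

-- pvRepl fires on an exact leading occurrence of old
theorem pvRepl_front (old new v : List Char) (hold : old ≠ []) :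
    pvRepl old new (old ++ v) = new ++ pvRepl old new v := by
  obtain ⟨o, old', rfl⟩ : ∃ o old'', old = o :: old'' := by
    cases old with
    | nil => exact absurd rfl hold
    | cons o old'' => exact ⟨o, old'', rfl⟩
  rw [List.cons_append, pvRepl_cons,
    if_pos (by rw [List.isPrefixOf_iff_prefix, ← List.cons_append]; exact ⟨v, rfl⟩)]
  simp [List.drop_left']

-- an ASCII string is a prefix of pvRepl's output only if it was a prefix of the input
theorem prefix_of_pvRepl (old new : List Char) (hne : new ≠ [])
    (hnew : ∀ c ∈ new, 128 ≤ c.toNat) :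
    ∀ (n : Nat) (s p : List Char), s.length ≤ n → (∀ c ∈ p, c.toNat < 128) →
      p <+: pvRepl old new s → p <+: s := by
  intro n
  induction n with
  | zero =>
      intro s p hs hp hpre
      have : s = [] := by cases s <;> simp_all
      subst this
      simpa [pvRepl_nil] using hpre
  | succ m ih =>
      intro s p hs hp hpre
      cases s with
      | nil => simpa [pvRepl_nil] using hpre
      | cons c t =>
          rw [pvRepl_cons] at hpre
          by_cases hm : old.isPrefixOf (c :: t) = true
          · rw [if_pos hm] at hpre
            cases p with
            | nil => exact List.nil_prefix
            | cons a p' =>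
                exfalso
                obtain ⟨b, new', rfl⟩ : ∃ b new'', new = b :: new'' := by
                  cases new with
                  | nil => exact absurd rfl hne
                  | cons b new'' => exact ⟨b, new'', rfl⟩
                have hab : a = b := by
                  rw [List.cons_append] at hpre
                  exact (List.cons_prefix_cons.mp hpre).1
                have h1 : 128 ≤ b.toNat := hnew b (by simp)
                have h2 : a.toNat < 128 := hp a (by simp)
                rw [hab] at h2
                omega
          · rw [if_neg hm] at hpre
            cases p with
            | nil => exact List.nil_prefix
            | cons a p' =>
                rcases List.cons_prefix_cons.mp hpre with ⟨rfl, hp'⟩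
                have := ih t p' (by simpa using Nat.le_of_succ_le_succ hs)
                  (fun x hx => hp x (by simp [hx])) hp'
                exact List.cons_prefix_cons.mpr ⟨rfl, this⟩

-- the chain of pvRepl passes over a list of (key, value) pairs
def pvChain (P : List (List Char × List Char)) (s : List Char) : List Char :=
  P.foldl (fun acc p => pvRepl p.1 p.2 acc) s

-- well-formedness of a pair table: nonempty ASCII keys, nonempty non-ASCII values
def pvGood (P : List (List Char × List Char)) : Prop :=
  ∀ p ∈ P, p.1 ≠ [] ∧ (∀ c ∈ p.1, c.toNat < 128) ∧ p.2 ≠ [] ∧ (∀ c ∈ p.2, 128 ≤ c.toNat)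

theorem pvChain_nil (P : List (List Char × List Char)) : pvChain P [] = [] := by
  induction P with
  | nil => rfl
  | cons p P' ih => simpa [pvChain, List.foldl_cons, pvRepl_nil] using ih

-- character classes give separation against any value block
theorem class_sep (k v : List Char) (hk : k ≠ []) (hka : ∀ c ∈ k, c.toNat < 128)
    (hv : ∀ c ∈ v, 128 ≤ c.toNat) : pvSep k v := by
  intro t ht htne
  have hsub : ∀ c ∈ t, 128 ≤ c.toNat := by
    intro c hc
    exact hv c (((List.mem_tails _ _).mp ht).sublist.mem hc)
  obtain ⟨a, k', rfl⟩ : ∃ a k'', k = a :: k'' := by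
    cases k with
    | nil => exact absurd rfl hk
    | cons a k'' => exact ⟨a, k'', rfl⟩
  obtain ⟨b, t', rfl⟩ : ∃ b t'', t = b :: t'' := by
    cases t with
    | nil => exact absurd rfl htne
    | cons b t'' => exact ⟨b, t'', rfl⟩
  have h1 : a.toNat < 128 := hka a (by simp)
  have h2 : 128 ≤ b.toNat := hsub b (by simp)
  constructor
  · intro h
    rcases List.cons_prefix_cons.mp h with ⟨rfl, -⟩
    omega
  · intro h
    rcases List.cons_prefix_cons.mp h with ⟨rfl, -⟩
    omega

-- a chain whose keys are all separated from the block u leaves u in front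
theorem pvChain_block (P : List (List Char × List Char)) (u v : List Char)
    (h : ∀ p ∈ P, pvSep p.1 u) : pvChain P (u ++ v) = u ++ pvChain P v := by
  induction P generalizing v with
  | nil => rfl
  | cons p P' ih =>
      simp only [pvChain, List.foldl_cons]
      rw [pvRepl_append p.1 p.2 u v (h p (by simp))]
      exact ih _ (fun q hq => h q (List.mem_cons_of_mem p hq))

-- when no key matches at the front, the chain copies the head character
theorem pvChain_cons : ∀ (P : List (List Char × List Char)), pvGood P → ∀ (c : Char)
    (cs : List Char), (∀ p ∈ P, ¬ p.1 <+: (c :: cs)) →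
    pvChain P (c :: cs) = c :: pvChain P cs := by
  intro P
  induction P with
  | nil => intro _ c cs _; rfl
  | cons p P' ih =>
      intro hG c cs h
      simp only [pvChain, List.foldl_cons]
      have hp1 : ¬ p.1 <+: (c :: cs) := h p (by simp)
      rw [pvRepl_cons, if_neg (by simpa [List.isPrefixOf_iff_prefix] using hp1)]
      have hG' : pvGood P' := fun q hq => hG q (List.mem_cons_of_mem p hq)
      refine ih hG' c (pvRepl p.1 p.2 cs) ?_
      intro q hq hpre
      obtain ⟨-, -, hvne, hva⟩ := hG p (by simp)
      obtain ⟨-, hqa, -, -⟩ := hG q (List.mem_cons_of_mem p hq)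
      have hcons : q.1 <+: pvRepl p.1 p.2 (c :: cs) := by
        rw [pvRepl_cons, if_neg (by simpa [List.isPrefixOf_iff_prefix] using hp1)]
        exact hpre
      have := prefix_of_pvRepl p.1 p.2 hvne hva (c :: cs).length (c :: cs) q.1
        (le_refl _) hqa hcons
      exact h q (List.mem_cons_of_mem p hq) this

-- main scan/chain agreement, by strong induction on the string length
theorem pvChain_eq_pvScan : ∀ (n : Nat) (s : List Char), s.length ≤ n →
    pvChain pvPairs s = pvScan s := by
  have hG : pvGood pvPairs := by
    intro p hp
    unfold pvPairs at hp
    fin_cases hp <;>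
      exact ⟨by simp, by intro c hc; fin_cases hc <;> decide, by simp,
        by intro c hc; fin_cases hc <;> decide⟩
  have hPW : pvPairs.Pairwise (fun p q => pvSep p.1 q.1) := by
    unfold pvPairs
    refine List.Pairwise.cons ?_ (List.Pairwise.cons ?_ (List.Pairwise.cons ?_
      (List.Pairwise.cons ?_ (List.Pairwise.cons ?_ (List.Pairwise.cons ?_
      (List.Pairwise.cons ?_ (List.Pairwise.cons ?_ (List.Pairwise.cons ?_
      (List.Pairwise.cons ?_ List.Pairwise.nil))))))))) <;>
      (intro q hq; fin_cases hq <;> (intro t ht hne; fin_cases ht <;> simp_all))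
  intro n
  induction n with
  | zero =>
      intro s hs
      have : s = [] := by cases s <;> simp_all
      subst this
      rw [pvChain_nil, pvScan]
  | succ m ih =>
      intro s hs
      cases s with
      | nil => rw [pvChain_nil, pvScan]
      | cons c cs =>
          rw [pvScan]
          cases hf : pvPairs.find? (fun p => p.1.isPrefixOf (c :: cs)) with
          | none =>
              have hnone : ∀ p ∈ pvPairs, ¬ p.1 <+: (c :: cs) := by
                intro p hp
                have := List.find?_eq_none.mp hf p hp
                simpa [List.isPrefixOf_iff_prefix] using this
              rw [pvChain_cons pvPairs hG c cs hnone]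
              rw [ih cs (by simp only [List.length_cons] at hs; omega)]
          | some kv =>
              obtain ⟨k, v⟩ := kv
              rcases List.find?_eq_some_iff_append.mp hf with ⟨hpk, P₁, P₂, hsplit, hbefore⟩
              have hkpre : k <+: (c :: cs) := List.isPrefixOf_iff_prefix.mp hpk
              have hmem : (k, v) ∈ pvPairs := by rw [hsplit]; simp
              obtain ⟨hkne, -, hvne, hva⟩ := hG (k, v) hmem
              obtain ⟨rest, hrest⟩ := hkpre
              -- chain = pvChain P₁ then the (k,v) pass then pvChain P₂
              have hPW' := hsplit ▸ hPW
              rw [List.pairwise_append] at hPW'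
              have hsep₁ : ∀ p ∈ P₁, pvSep p.1 k := by
                intro p hp
                exact hPW'.2.2 p hp (k, v) (by simp)
              have hsep₂ : ∀ p ∈ P₂, pvSep p.1 v := by
                intro p hp
                obtain ⟨hkne', hka', -, -⟩ := hG p (by rw [hsplit]; simp [hp])
                exact class_sep p.1 v hkne' hka' hva
              have step : pvChain pvPairs (c :: cs) = v ++ pvChain pvPairs rest := by
                rw [hsplit, ← hrest]
                unfold pvChain
                rw [List.foldl_append, List.foldl_cons]
                show pvChain P₂ (pvRepl k v (pvChain P₁ (k ++ rest))) = _
                rw [pvChain_block P₁ k rest hsep₁, pvRepl_front k v _ hkne,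
                  pvChain_block P₂ v _ hsep₂]
                show _ = v ++ pvChain (P₁ ++ (k, v) :: P₂) rest
                unfold pvChain
                rw [List.foldl_append, List.foldl_cons]
              rw [step]
              show v ++ pvChain pvPairs rest = v ++ pvScan (cs.drop (k.length - 1))
              have hrest' : rest = cs.drop (k.length - 1) := by
                obtain ⟨a, k', rfl⟩ : ∃ a k'', k = a :: k'' := by
                  cases k with
                  | nil => exact absurd rfl hkne
                  | cons a k'' => exact ⟨a, k'', rfl⟩
                have := congrArg (List.drop (a :: k').length) hrest
                rw [List.drop_left] at this
                rw [this]
                simp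
              have hlen : rest.length ≤ m := by
                have h1 : k.length + rest.length = cs.length + 1 := by
                  have := congrArg List.length hrest
                  simpa using this
                have h2 : 1 ≤ k.length := by
                  cases k with
                  | nil => exact absurd rfl hkne
                  | cons _ _ => simp
                have h3 : cs.length + 1 ≤ m + 1 := by simpa using hs
                omega
              rw [← hrest', ih rest hlen]

-- one tile: A's ten chained replaces equal B's single scan
theorem tile_eq (t : String) :
    (PySem.Str.replace (PySem.Str.replace (PySem.Str.replace (PySem.Str.replace
      (PySem.Str.replace (PySem.Str.replace (PySem.Str.replace (PySem.Str.replace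
      (PySem.Str.replace (PySem.Str.replace t "wan" "万") "tong" "筒") "tiao" "条")
      "dong" "东风") "nanfeng" "南风") "xi" "西风") "bei" "北风")
      "hongzhong" "红中") "fa" "发财") "bai" "白版") =
    String.ofList (pvScan t.toList) := by
  simp only [PySem.Str.replace, String.toList_ofList]
  rw [replace_eq_pvRepl "wan".toList "万".toList _ (by decide),
    replace_eq_pvRepl "tong".toList "筒".toList _ (by decide),
    replace_eq_pvRepl "tiao".toList "条".toList _ (by decide),
    replace_eq_pvRepl "dong".toList "东风".toList _ (by decide),
    replace_eq_pvRepl "nanfeng".toList "南风".toList _ (by decide),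
    replace_eq_pvRepl "xi".toList "西风".toList _ (by decide),
    replace_eq_pvRepl "bei".toList "北风".toList _ (by decide),
    replace_eq_pvRepl "hongzhong".toList "红中".toList _ (by decide),
    replace_eq_pvRepl "fa".toList "发财".toList _ (by decide),
    replace_eq_pvRepl "bai".toList "白版".toList _ (by decide)]
  rw [← pvChain_eq_pvScan t.toList.length t.toList (le_refl _)]
  simp [pvChain, pvPairs]

-- ===== VERDICT (by name: the statement is the Claim_ definition above) =====
theorem normalize_tiles_to_chinese_spec : Claim_equal_normalize_tiles_to_chinese := by
  intro tiles _
  unfold Spec_normalize_tiles_to_chinese normalize_tiles_to_chinese normalize_tiles_to_chinese_alt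
  exact List.map_congr_left (fun t _ => tile_eq t)
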